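-- pv_equiv track=rewrite | github.com/wriemer/UA-Bball-Wearable-Project | CV/player_ball_assigner/player_ball_assigner.py | correct_possession_history
-- ===== SOURCE A (Python) =====
-- def correct_possession_history(possession_history, tolerance=3):
--     corrected = []
--     current = possession_history[0]
--     new = -1
--     new_score = 0
--
--     for player in possession_history:
--         if player == current:
--             while new_score > 0:
--                 corrected.append(current)
--                 new_score -= 1
--             corrected.append(player)
--         elif player == new:
--             new_score += 1
--             if new_score > tolerance:
--                 current = new
--                 while new_score > 0:
--                     corrected.append(current)
--                     new_score -= 1
--         else:
--             while new_score > 0: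
--                 corrected.append(current)
--                 new_score -= 1
--             new = player
--             new_score = 1
--
--     while new_score > 0:
--         corrected.append(current)
--         new_score -= 1
--
--     return corrected
-- ===== SOURCE B (Python) =====
-- from itertools import groupby
--
-- def correct_possession_history(possession_history, tolerance=3):
--     if not possession_history:
--         return []
--     current = possession_history[0]
--     corrected = []
--     for value, group in groupby(possession_history):
--         run = sum(1 for _ in group)
--         if value == current:
--             corrected.extend([value] * run)
--         elif run > tolerance:
--             current = value
--             corrected.extend([value] * run)
--         else:
--             corrected.extend([current] * run)
--     return corrected
-- ===== Notes on version B (the rewrite author's own statement) =====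
-- stated objective: alternative
-- what changed: B replaces A's one-pass accumulator/flush state machine (current/new/new_score with while-loop flushes) by a two-phase decomposition: run-length-encode the history with itertools.groupby, then rebuild it run by run, keeping a run iff it matches the current holder or is longer than the tolerance.
-- intended difference: For tolerance <= 0 on histories containing an isolated single-frame possession after index 0, A keeps or flips possession for such a frame inconsistently depending on leftover 'new' state (the strict > tolerance check is skipped in the branch that starts a fresh candidate run), while B uniformly accepts every run longer than the tolerance as a real switch, which is the intended reading of tolerance; the witness shows both values. — e.g. on correct_possession_history([1, 2], 0): A returns [1, 1], B returns [1, 2]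
import Mathlib
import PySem

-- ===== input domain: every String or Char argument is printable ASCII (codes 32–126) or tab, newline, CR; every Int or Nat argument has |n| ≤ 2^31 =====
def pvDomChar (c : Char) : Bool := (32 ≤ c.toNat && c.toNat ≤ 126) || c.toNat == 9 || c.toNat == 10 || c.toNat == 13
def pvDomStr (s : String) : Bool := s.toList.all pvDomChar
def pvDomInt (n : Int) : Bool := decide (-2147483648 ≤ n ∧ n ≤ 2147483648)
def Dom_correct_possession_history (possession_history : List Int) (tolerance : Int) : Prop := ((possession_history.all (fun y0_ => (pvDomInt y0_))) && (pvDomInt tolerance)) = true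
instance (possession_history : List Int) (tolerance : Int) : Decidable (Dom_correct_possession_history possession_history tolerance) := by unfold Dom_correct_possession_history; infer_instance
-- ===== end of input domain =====

-- B replaces A's accumulator/flush state machine by a two-phase run-length-encode-then-rebuild
-- decomposition (objective: alternative); for tolerance ≤ 0 with an isolated one-frame run A's
-- leftover 'new' state gives inconsistent results, stated as an intended difference D_ below.


-- ===== PORT A =====
-- exact port of "while new_score > 0: corrected.append(c); new_score -= 1" (appends max(s,0) copies)
def pvAppendN (corr : List Int) (c : Int) (s : Int) : List Int := corr ++ List.replicate s.toNat c

structure PVSt where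
  corr : List Int
  cur : Int
  nw : Int
  sc : Int
deriving Repr, DecidableEq

-- one iteration of A's for-loop
def pvStepA (t : Int) (st : PVSt) (p : Int) : PVSt :=
  if p = st.cur then ⟨pvAppendN st.corr st.cur st.sc ++ [p], st.cur, st.nw, 0⟩
  else if p = st.nw then
    let sc := st.sc + 1
    if sc > t then ⟨pvAppendN st.corr st.nw sc, st.nw, st.nw, 0⟩
    else ⟨st.corr, st.cur, st.nw, sc⟩
  else ⟨pvAppendN st.corr st.cur st.sc, st.cur, p, 1⟩

def correct_possession_history (possession_history : List Int) (tolerance : Int) : List Int :=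
  match possession_history with
  | [] => []  -- Python raises IndexError on possession_history[0]; excluded by Pre_
  | h0 :: _ =>
    let st := possession_history.foldl (pvStepA tolerance) ⟨[], h0, -1, 0⟩
    pvAppendN st.corr st.cur st.sc

-- ===== PORT B =====
-- run-length encoding, as itertools.groupby produces it (value, run length)
def pvRle : List Int → List (Int × Nat)
  | [] => []
  | x :: xs =>
    match pvRle xs with
    | [] => [(x, 1)]
    | (v, k) :: rs => if x = v then (v, k + 1) :: rs else (x, 1) :: (v, k) :: rs

-- one iteration of B's for-loop over the runs
def pvStepB (t : Int) (acc : List Int × Int) (r : Int × Nat) : List Int × Int :=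
  if r.1 = acc.2 then (acc.1 ++ List.replicate r.2 r.1, acc.2)
  else if (r.2 : Int) > t then (acc.1 ++ List.replicate r.2 r.1, r.1)
  else (acc.1 ++ List.replicate r.2 acc.2, acc.2)

def correct_possession_history_alt (possession_history : List Int) (tolerance : Int) : List Int :=
  match possession_history with
  | [] => []
  | h0 :: _ => ((pvRle possession_history).foldl (pvStepB tolerance) ([], h0)).1

-- ===== PRECONDITION & SPEC =====
-- Pre_ excludes only the empty list, on which A raises IndexError.
def Pre_correct_possession_history (possession_history : List Int) (tolerance : Int) : Prop :=
  possession_history ≠ []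
instance (possession_history : List Int) (tolerance : Int) : Decidable (Pre_correct_possession_history possession_history tolerance) := by unfold Pre_correct_possession_history; infer_instance
def pvWitness_correct_possession_history : List Int × Int := ([1, 1, 2, 2, 2, 2, 1], 3)

-- true iff the list (whose element before the scanned part is p) contains an isolated
-- one-element run at a position ≥ 1, i.e. an element differing from both neighbours
def pvHasIso (p : Int) : List Int → Bool
  | [] => false
  | x :: xs =>
    ((decide (x ≠ p)) && (match xs with | [] => true | y :: _ => decide (x ≠ y))) || pvHasIso x xs

-- When tolerance ≤ 0 and the history contains an isolated single-frame run (after index 0),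
-- A keeps or flips possession for such a run inconsistently depending on leftover 'new' state
-- (the > tolerance check is skipped in the branch that starts a fresh candidate), while B
-- uniformly treats every run longer than tolerance as a real switch, the intended reading.
def D_correct_possession_history (possession_history : List Int) (tolerance : Int) : Prop :=
  tolerance ≤ 0 ∧ pvHasIso possession_history.headI possession_history.tail = true
instance (possession_history : List Int) (tolerance : Int) : Decidable (D_correct_possession_history possession_history tolerance) := by unfold D_correct_possession_history; infer_instance

def Spec_correct_possession_history (possession_history : List Int) (tolerance : Int) (out : List Int) : Prop := ¬ D_correct_possession_history possession_history tolerance → out = correct_possession_history_alt possession_history tolerance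
instance (possession_history : List Int) (tolerance : Int) (out : List Int) : Decidable (Spec_correct_possession_history possession_history tolerance out) := by unfold Spec_correct_possession_history; infer_instance

def pvDiffWitness_correct_possession_history : List Int × Int := ([1, 2], 0)
def pvDiffWitnessOut_correct_possession_history : (List Int) × (List Int) := ([1, 1], [1, 2])

-- ===== CLAIM (what is proved, stated in full; the proofs are below) =====
def Claim_unchanged_correct_possession_history : Prop := ∀ (possession_history : List Int) (tolerance : Int), Dom_correct_possession_history possession_history tolerance → Pre_correct_possession_history possession_history tolerance → Spec_correct_possession_history possession_history tolerance (correct_possession_history possession_history tolerance)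
def Claim_changed_correct_possession_history : Prop := Dom_correct_possession_history (pvDiffWitness_correct_possession_history.1) (pvDiffWitness_correct_possession_history.2) ∧ Pre_correct_possession_history (pvDiffWitness_correct_possession_history.1) (pvDiffWitness_correct_possession_history.2) ∧ D_correct_possession_history (pvDiffWitness_correct_possession_history.1) (pvDiffWitness_correct_possession_history.2) ∧ correct_possession_history (pvDiffWitness_correct_possession_history.1) (pvDiffWitness_correct_possession_history.2) = pvDiffWitnessOut_correct_possession_history.1 ∧ correct_possession_history_alt (pvDiffWitness_correct_possession_history.1) (pvDiffWitness_correct_possession_history.2) = pvDiffWitnessOut_correct_possession_history.2 ∧ pvDiffWitnessOut_correct_possession_history.1 ≠ pvDiffWitnessOut_correct_possession_history.2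

-- ===== LEMMAS AND PROOFS =====

def pvFin (st : PVSt) : List Int := pvAppendN st.corr st.cur st.sc

def pvFlat : List (Int × Nat) → List Int
  | [] => []
  | r :: rs => List.replicate r.2 r.1 ++ pvFlat rs

theorem pvFlat_nil : pvFlat [] = [] := rfl
theorem pvFlat_cons (r : Int × Nat) (rs : List (Int × Nat)) :
    pvFlat (r :: rs) = List.replicate r.2 r.1 ++ pvFlat rs := rfl

theorem pvRle_pos : ∀ (xs : List Int) r, r ∈ pvRle xs → 1 ≤ r.2 := by
  intro xs
  induction xs with
  | nil => intro r h; simp [pvRle] at h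
  | cons x xs ih =>
    intro r h
    simp only [pvRle] at h
    cases hR : pvRle xs with
    | nil => rw [hR] at h; simp at h; simp [h]
    | cons a rs =>
      obtain ⟨v, k⟩ := a
      rw [hR] at h
      by_cases hxv : x = v
      · simp only [if_pos hxv, List.mem_cons] at h
        rcases h with h | h
        · simp [h]
        · exact ih r (by rw [hR]; exact List.mem_cons_of_mem _ h)
      · simp only [if_neg hxv, List.mem_cons] at h
        rcases h with h | h | h
        · simp [h]
        · exact ih r (by rw [hR, h]; exact List.mem_cons_self)
        · exact ih r (by rw [hR]; exact List.mem_cons_of_mem _ h)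

theorem pvRle_flat : ∀ (xs : List Int), pvFlat (pvRle xs) = xs := by
  intro xs
  induction xs with
  | nil => rfl
  | cons x xs ih =>
    simp only [pvRle]
    cases hR : pvRle xs with
    | nil => rw [hR] at ih; simp only [pvFlat_cons, pvFlat_nil] at ih ⊢; simp [← ih]
    | cons a rs =>
      obtain ⟨v, k⟩ := a
      rw [hR] at ih
      simp only [pvFlat_cons] at ih
      simp only
      by_cases hxv : x = v
      · subst hxv
        rw [if_pos rfl, pvFlat_cons]
        simp only [List.replicate_succ]
        simp [ih]
      · rw [if_neg hxv, pvFlat_cons]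
        simp [pvFlat_cons, ih]

theorem pvRle_head : ∀ (x : Int) (xs : List Int), ∃ k rs, pvRle (x :: xs) = (x, k) :: rs ∧ 1 ≤ k := by
  intro x xs
  simp only [pvRle]
  cases hR : pvRle xs with
  | nil => exact ⟨1, [], rfl, le_refl _⟩
  | cons a rs =>
    obtain ⟨v, k⟩ := a
    by_cases hxv : x = v
    · subst hxv; exact ⟨k + 1, rs, by simp, by omega⟩
    · exact ⟨1, (v, k) :: rs, by simp [hxv], le_refl _⟩

theorem pvRle_chain : ∀ (xs : List Int), List.IsChain (fun a b : Int × Nat => a.1 ≠ b.1) (pvRle xs) := by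
  intro xs
  induction xs with
  | nil => simp [pvRle]
  | cons x xs ih =>
    simp only [pvRle]
    cases hR : pvRle xs with
    | nil => simp
    | cons a rs =>
      obtain ⟨v, k⟩ := a
      rw [hR] at ih
      by_cases hxv : x = v
      · simp only [if_pos hxv]
        cases rs with
        | nil => simp
        | cons b rs' =>
          rw [List.isChain_cons] at ih ⊢
          exact ih
      · simp only [if_neg hxv]
        rw [List.isChain_cons]
        exact ⟨by intro y hy; simp at hy; subst hy; simpa using hxv, ih⟩

theorem pvRle_cons (x : Int) (xs : List Int) : pvRle (x :: xs) =
    (match pvRle xs with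
     | [] => [(x, 1)]
     | (v, k) :: rs => if x = v then (v, k + 1) :: rs else (x, 1) :: (v, k) :: rs) := rfl

theorem pvRle_big : ∀ (xs : List Int) (x : Int), pvHasIso x xs = false →
    ∀ r ∈ (pvRle (x :: xs)).tail, 2 ≤ r.2 := by
  intro xs
  induction xs with
  | nil => intro x _ r h; simp [pvRle] at h
  | cons y ys ih =>
    intro x hIso r hr
    simp only [pvHasIso, Bool.or_eq_false_iff, Bool.and_eq_false_iff] at hIso
    obtain ⟨h1, h2⟩ := hIso
    have ihy := ih y h2
    obtain ⟨k, rs, hR, hk⟩ := pvRle_head y ys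
    rw [pvRle_cons x (y :: ys), hR] at hr
    simp only at hr
    by_cases hxy : x = y
    · rw [if_pos hxy, List.tail_cons] at hr
      exact ihy r (by rw [hR, List.tail_cons]; exact hr)
    · rw [if_neg hxy, List.tail_cons] at hr
      rcases List.mem_cons.mp hr with h | h
      · -- r = (y, k); show 2 ≤ k from "y is not isolated": ys starts with y
        have hy2 : ∃ zs, ys = y :: zs := by
          rcases h1 with h1 | h1
          · simp at h1; exact absurd h1.symm hxy
          · cases ys with
            | nil => simp at h1
            | cons z zs => simp at h1; exact ⟨zs, by simp [h1]⟩
        obtain ⟨zs, hzs⟩ := hy2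
        subst hzs
        obtain ⟨k', rs', hR', hk'⟩ := pvRle_head y zs
        rw [pvRle_cons y (y :: zs), hR'] at hR
        simp only [if_pos rfl] at hR
        have hkk : k = k' + 1 := by
          injection hR with ha hb
          injection ha with h1a h1b
          omega
        subst h
        simp only [hkk]
        omega
      · exact ihy r (by rw [hR, List.tail_cons]; exact h)

theorem pvL1 (t : Int) : ∀ (k : Nat) (corr : List Int) (c m : Int) (ys : List Int),
    List.foldl (pvStepA t) ⟨corr, c, m, 0⟩ (List.replicate k c ++ ys)
      = List.foldl (pvStepA t) ⟨corr ++ List.replicate k c, c, m, 0⟩ ys := by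
  intro k
  induction k with
  | zero => intro corr c m ys; simp
  | succ k ih =>
    intro corr c m ys
    rw [List.replicate_succ, List.cons_append, List.foldl_cons]
    have hstep : pvStepA t ⟨corr, c, m, 0⟩ c = ⟨corr ++ [c], c, m, 0⟩ := by
      simp [pvStepA, pvAppendN]
    rw [hstep, ih]
    simp

theorem pvLacc (t : Int) : ∀ (k : Nat) (s : Int) (corr : List Int) (c v : Int) (ys : List Int),
    v ≠ c → 0 ≤ s → s + k ≤ t →
    List.foldl (pvStepA t) ⟨corr, c, v, s⟩ (List.replicate k v ++ ys)
      = List.foldl (pvStepA t) ⟨corr, c, v, s + k⟩ ys := by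
  intro k
  induction k with
  | zero => intro s corr c v ys _ _ _; simp
  | succ k ih =>
    intro s corr c v ys hvc hs hst
    rw [List.replicate_succ, List.cons_append, List.foldl_cons]
    have hstep : pvStepA t ⟨corr, c, v, s⟩ v = ⟨corr, c, v, s + 1⟩ := by
      have h1 : ¬ (s + 1 > t) := by push_cast at hst; omega
      simp [pvStepA, hvc, h1]
    rw [hstep, ih (s + 1) corr c v ys hvc (by omega) (by push_cast at hst ⊢; omega)]
    have : s + 1 + (k : Int) = s + ((k : Nat) + 1 : Nat) := by push_cast; ring
    rw [this]

theorem pvLfirst (t : Int) (corr : List Int) (c m v : Int) (hvc : v ≠ c) (ht : 1 ≤ t) :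
    pvStepA t ⟨corr, c, m, 0⟩ v = ⟨corr, c, v, 1⟩ := by
  by_cases hvm : v = m
  · subst hvm
    simp [pvStepA, hvc]
    omega
  · simp [pvStepA, hvc, hvm, pvAppendN]

theorem pvLswitch (t : Int) : ∀ (k : Nat) (corr : List Int) (c m v : Int) (ys : List Int),
    v ≠ c → 1 ≤ k → (1 ≤ t ∨ 2 ≤ k) → (t < (k : Int)) →
    List.foldl (pvStepA t) ⟨corr, c, m, 0⟩ (List.replicate k v ++ ys)
      = List.foldl (pvStepA t) ⟨corr ++ List.replicate k v, v, v, 0⟩ ys := by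
  intro k corr c m v ys hvc hk hbig hkt
  by_cases ht : 1 ≤ t
  · -- tolerance ≥ 1: accumulate to t, switch at score t+1, rest appended directly
    set a : Nat := t.toNat with ha
    have hat : (a : Int) = t := Int.toNat_of_nonneg (by omega)
    have hka : a + 1 ≤ k := by omega
    have ha1 : 1 ≤ a := by omega
    have hsplit : List.replicate k v
        = v :: (List.replicate (a - 1) v ++ (v :: List.replicate (k - a - 1) v)) := by
      calc List.replicate k v = List.replicate ((a - 1 + (k - a - 1 + 1)) + 1) v := by
            rw [show (a - 1 + (k - a - 1 + 1)) + 1 = k by omega]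
        _ = v :: (List.replicate (a - 1) v ++ List.replicate (k - a - 1 + 1) v) := by
            rw [List.replicate_succ, List.replicate_add]
        _ = v :: (List.replicate (a - 1) v ++ (v :: List.replicate (k - a - 1) v)) := by
            rw [List.replicate_succ]
    conv_lhs => rw [hsplit]
    simp only [List.cons_append, List.append_assoc, List.foldl_cons]
    rw [pvLfirst t corr c m v hvc ht]
    rw [pvLacc t (a - 1) 1 corr c v _ hvc (by omega) (by
      have : ((a - 1 : Nat) : Int) = t - 1 := by omega
      omega)]
    have hsc : (1 : Int) + ((a - 1 : Nat) : Int) = t := by omega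
    rw [hsc, List.foldl_cons]
    have hstep2 : pvStepA t ⟨corr, c, v, t⟩ v = ⟨corr ++ List.replicate (a + 1) v, v, v, 0⟩ := by
      simp [pvStepA, hvc, pvAppendN, show t + 1 > t by omega, show (t + 1).toNat = a + 1 by omega]
    rw [hstep2, pvL1]
    rw [List.append_assoc, ← List.replicate_add, show a + 1 + (k - a - 1) = k by omega]
  · -- tolerance ≤ 0 and run length ≥ 2: the switch happens within the first two elements
    have ht0 : t ≤ 0 := by omega
    have hk2 : 2 ≤ k := by rcases hbig with h | h <;> omega
    by_cases hvm : v = m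
    · subst hvm
      have hstep : pvStepA t ⟨corr, c, v, 0⟩ v = ⟨corr ++ [v], v, v, 0⟩ := by
        simp [pvStepA, hvc, pvAppendN]
        omega
      conv_lhs => rw [show List.replicate k v = v :: List.replicate (k - 1) v by
        rw [← List.replicate_succ, show k - 1 + 1 = k by omega]]
      rw [List.cons_append, List.foldl_cons, hstep, pvL1]
      rw [List.append_assoc, show [v] ++ List.replicate (k - 1) v = List.replicate k v by
        rw [List.singleton_append, ← List.replicate_succ, show k - 1 + 1 = k by omega]]
    · have hstep1 : pvStepA t ⟨corr, c, m, 0⟩ v = ⟨corr, c, v, 1⟩ := by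
        simp [pvStepA, hvc, hvm, pvAppendN]
      have hstep2 : pvStepA t ⟨corr, c, v, 1⟩ v = ⟨corr ++ List.replicate 2 v, v, v, 0⟩ := by
        simp [pvStepA, hvc, pvAppendN]
        omega
      conv_lhs => rw [show List.replicate k v = v :: v :: List.replicate (k - 2) v by
        rw [← List.replicate_succ, ← List.replicate_succ, show k - 2 + 1 + 1 = k by omega]]
      rw [List.cons_append, List.cons_append, List.foldl_cons, hstep1, List.foldl_cons, hstep2, pvL1]
      rw [List.append_assoc, ← List.replicate_add, show 2 + (k - 2) = k by omega]

theorem pvFlushEq (t : Int) (ys : List Int) (corr : List Int) (c v : Int) (s : Int)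
    (_hs : 0 ≤ s) (hy : ys = [] ∨ ∃ w ws, ys = w :: ws ∧ w ≠ v) :
    pvFin (List.foldl (pvStepA t) ⟨corr, c, v, s⟩ ys)
      = pvFin (List.foldl (pvStepA t) ⟨corr ++ List.replicate s.toNat c, c, v, 0⟩ ys) := by
  rcases hy with rfl | ⟨w, ws, rfl, hwv⟩
  · simp [pvFin, pvAppendN]
  · rw [List.foldl_cons, List.foldl_cons]
    have : pvStepA t ⟨corr, c, v, s⟩ w = pvStepA t ⟨corr ++ List.replicate s.toNat c, c, v, 0⟩ w := by
      by_cases hwc : w = c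
      · simp [pvStepA, hwc, pvAppendN]
      · simp [pvStepA, hwc, hwv, pvAppendN]
    rw [this]

theorem pvMain (t : Int) : ∀ (runs : List (Int × Nat)) (c m : Int) (corr : List Int),
    (∀ r ∈ runs, 1 ≤ r.2) →
    List.IsChain (fun a b : Int × Nat => a.1 ≠ b.1) runs →
    (1 ≤ t ∨ ∀ r ∈ runs, 2 ≤ r.2) →
    pvFin (List.foldl (pvStepA t) ⟨corr, c, m, 0⟩ (pvFlat runs))
      = (List.foldl (pvStepB t) (corr, c) runs).1 := by
  intro runs
  induction runs with
  | nil => intro c m corr _ _ _; simp [pvFlat, pvFin, pvAppendN]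
  | cons r rs ih =>
    intro c m corr hpos hchain hbig
    obtain ⟨v, k⟩ := r
    have hk : 1 ≤ k := hpos (v, k) List.mem_cons_self
    have hpos' : ∀ r ∈ rs, 1 ≤ r.2 := fun r hr => hpos r (List.mem_cons_of_mem _ hr)
    have hchain' : List.IsChain (fun a b : Int × Nat => a.1 ≠ b.1) rs := hchain.tail
    have hbig' : 1 ≤ t ∨ ∀ r ∈ rs, 2 ≤ r.2 := by
      rcases hbig with h | h
      · exact Or.inl h
      · exact Or.inr fun r hr => h r (List.mem_cons_of_mem _ hr)
    rw [pvFlat_cons]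
    by_cases hvc : v = c
    · subst hvc
      rw [pvL1, ih v m (corr ++ List.replicate k v) hpos' hchain' hbig']
      rw [List.foldl_cons]
      have : pvStepB t (corr, v) (v, k) = (corr ++ List.replicate k v, v) := by
        simp [pvStepB]
      rw [this]
    · by_cases hkt : t < (k : Int)
      · have hb2 : 1 ≤ t ∨ 2 ≤ k := by
          rcases hbig with h | h
          · exact Or.inl h
          · exact Or.inr (h (v, k) List.mem_cons_self)
        rw [pvLswitch t k corr c m v _ hvc hk hb2 hkt,
          ih v v (corr ++ List.replicate k v) hpos' hchain' hbig']
        rw [List.foldl_cons]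
        have : pvStepB t (corr, c) (v, k) = (corr ++ List.replicate k v, v) := by
          simp [pvStepB, hvc, hkt]
        rw [this]
      · -- pending run: k ≤ t, flushed as the current holder
        have ht1 : 1 ≤ t := by omega
        conv_lhs => rw [show List.replicate k v = v :: List.replicate (k - 1) v by
          rw [← List.replicate_succ, show k - 1 + 1 = k by omega]]
        rw [List.cons_append, List.foldl_cons, pvLfirst t corr c m v hvc ht1]
        rw [pvLacc t (k - 1) 1 corr c v _ hvc (by omega) (by
          have : ((k - 1 : Nat) : Int) = (k : Int) - 1 := by omega
          omega)]
        rw [show (1 : Int) + ((k - 1 : Nat) : Int) = (k : Int) by omega]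
        have hy : pvFlat rs = [] ∨ ∃ w ws, pvFlat rs = w :: ws ∧ w ≠ v := by
          cases rs with
          | nil => exact Or.inl rfl
          | cons r' rs' =>
            obtain ⟨w, k'⟩ := r'
            have hk' : 1 ≤ k' := hpos' (w, k') List.mem_cons_self
            have hwv : w ≠ v := by
              have := hchain
              rw [List.isChain_cons] at this
              have h := this.1 (w, k') (by simp)
              exact fun he => h he.symm
            refine Or.inr ⟨w, List.replicate (k' - 1) w ++ pvFlat rs', ?_, hwv⟩
            rw [pvFlat_cons]
            rw [show List.replicate k' w = w :: List.replicate (k' - 1) w by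
              rw [← List.replicate_succ, show k' - 1 + 1 = k' by omega]]
            simp
        rw [pvFlushEq t (pvFlat rs) corr c v (k : Int) (by omega) hy]
        rw [show ((k : Int)).toNat = k from by omega]
        rw [ih c v (corr ++ List.replicate k c) hpos' hchain' hbig']
        rw [List.foldl_cons]
        have : pvStepB t (corr, c) (v, k) = (corr ++ List.replicate k c, c) := by
          simp [pvStepB, hvc]
          omega
        rw [this]


-- ===== VERDICT (by name: the statement is the Claim_ definition above) =====
theorem correct_possession_history_spec : Claim_unchanged_correct_possession_history := by
  unfold Claim_unchanged_correct_possession_history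
  intro h t hdom hpre
  unfold Spec_correct_possession_history
  intro hnd
  cases h with
  | nil => exact absurd rfl hpre
  | cons h0 rest =>
    obtain ⟨k0, rs0, hR, hk0⟩ := pvRle_head h0 rest
    have hflat : pvFlat (pvRle (h0 :: rest)) = h0 :: rest := pvRle_flat _
    rw [hR, pvFlat_cons] at hflat
    show pvFin (List.foldl (pvStepA t) ⟨[], h0, -1, 0⟩ (h0 :: rest))
      = ((pvRle (h0 :: rest)).foldl (pvStepB t) ([], h0)).1
    conv_lhs => rw [← hflat]
    rw [pvL1 t k0 [] h0 (-1) (pvFlat rs0)]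
    simp only [List.nil_append]
    have hpos : ∀ r ∈ rs0, 1 ≤ r.2 := fun r hr =>
      pvRle_pos (h0 :: rest) r (by rw [hR]; exact List.mem_cons_of_mem _ hr)
    have hchain : List.IsChain (fun a b : Int × Nat => a.1 ≠ b.1) rs0 := by
      have := pvRle_chain (h0 :: rest)
      rw [hR] at this
      exact this.tail
    have hbig : 1 ≤ t ∨ ∀ r ∈ rs0, 2 ≤ r.2 := by
      by_cases ht : 1 ≤ t
      · exact Or.inl ht
      · right
        have hiso : pvHasIso h0 rest = false := by
          cases hB : pvHasIso h0 rest
          · rfl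
          · exact absurd ⟨by omega, by simpa using hB⟩ hnd
        intro r hr
        have := pvRle_big rest h0 hiso r (by rw [hR, List.tail_cons]; exact hr)
        exact this
    rw [pvMain t rs0 h0 (-1) (List.replicate k0 h0) hpos hchain hbig]
    rw [hR, List.foldl_cons]
    have : pvStepB t ([], h0) (h0, k0) = (List.replicate k0 h0, h0) := by simp [pvStepB]
    rw [this]

theorem correct_possession_history_changed : Claim_changed_correct_possession_history := by
  unfold Claim_changed_correct_possession_history; decide
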